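-- pv_equiv track=rewrite | github.com/sixtyops/manager | updater/telemetry.py | _aggregate_error_types
-- ===== SOURCE A (Python) =====
-- from collections import Counter
-- from typing import Any, Dict, List, Optional
--
-- def _aggregate_error_types(devices: Dict[str, Dict[str, Any]]) -> Dict[str, int]:
--     """Categorize and count error types without exposing specific details.
--
--     Groups errors into categories rather than sending raw error messages.
--     """
--     error_categories: Counter = Counter()
--
--     for device_data in devices.values():
--         error = device_data.get("error")
--         if error:
--             # Categorize errors without exposing specific details
--             error_lower = error.lower()
--             if "timeout" in error_lower or "timed out" in error_lower:
--                 error_categories["timeout"] += 1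
--             elif "connection" in error_lower or "connect" in error_lower:
--                 error_categories["connection_error"] += 1
--             elif "auth" in error_lower or "login" in error_lower or "credential" in error_lower:
--                 error_categories["authentication_error"] += 1
--             elif "upload" in error_lower:
--                 error_categories["upload_error"] += 1
--             elif "install" in error_lower:
--                 error_categories["install_error"] += 1
--             elif "reboot" in error_lower:
--                 error_categories["reboot_error"] += 1
--             elif "version" in error_lower or "verify" in error_lower:
--                 error_categories["verification_error"] += 1
--             else:
--                 error_categories["other_error"] += 1
--
--     return dict(error_categories)
-- ===== SOURCE B (Python) =====
-- from collections import Counter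
--
-- _CATEGORIES = ["timeout", "connection_error", "authentication_error",
--                "upload_error", "install_error", "reboot_error",
--                "verification_error", "other_error"]
--
-- _KEYWORD_RANK = {
--     "timeout": 0, "timed out": 0,
--     "connection": 1, "connect": 1,
--     "auth": 2, "login": 2, "credential": 2,
--     "upload": 3,
--     "install": 4,
--     "reboot": 5,
--     "version": 6, "verify": 6,
-- }
--
--
-- def _classify(error):
--     el = error.lower()
--     rank = min((r for kw, r in _KEYWORD_RANK.items() if kw in el), default=7)
--     return _CATEGORIES[rank]
--
--
-- def _aggregate_error_types(devices):
--     labels = [_classify(d["error"]) for d in devices.values() if d.get("error")]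
--     return dict(Counter(labels))
-- ===== Notes on version B (the rewrite author's own statement) =====
-- stated objective: alternative
-- what changed: Replaces A's first-match if/elif chain with a keyword-to-rank map: B collects the ranks of ALL matching keywords, takes their minimum (default 7), and indexes a category table; counting is staged (build the label list, then one Counter pass) instead of A's single fold with inline branching.
import Mathlib
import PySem

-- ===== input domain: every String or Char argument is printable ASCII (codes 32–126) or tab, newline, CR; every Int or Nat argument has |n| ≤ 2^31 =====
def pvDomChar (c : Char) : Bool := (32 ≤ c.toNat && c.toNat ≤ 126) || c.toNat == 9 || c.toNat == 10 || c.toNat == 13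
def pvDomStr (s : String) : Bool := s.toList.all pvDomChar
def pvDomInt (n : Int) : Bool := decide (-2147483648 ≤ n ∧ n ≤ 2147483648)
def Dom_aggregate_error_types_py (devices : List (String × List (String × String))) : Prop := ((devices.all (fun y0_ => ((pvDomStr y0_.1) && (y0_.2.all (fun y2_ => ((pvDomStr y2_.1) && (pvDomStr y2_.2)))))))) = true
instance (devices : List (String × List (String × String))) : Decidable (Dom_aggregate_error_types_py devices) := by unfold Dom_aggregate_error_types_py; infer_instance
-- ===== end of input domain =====

-- B replaces A's first-match if/elif chain by a keyword→rank map: it collects the ranks of ALL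
-- matching keywords, takes their minimum, and indexes a category table; counting is staged
-- (label list first, then a Counter pass). Same behaviour, different mechanism (alternative).

-- ===== PORT A =====
-- literal transliteration of A: Counter loop with the inline if/elif keyword chain
def aggregate_error_types_py (devices : List (String × List (String × String))) : List (String × Int) :=
  (devices.foldl (fun (cats : PySem.Dict String Int) dev =>
    match (PySem.Dict.mk dev.2).get? "error" with
    | none => cats
    | some error =>
      if error = "" then cats
      else
        let el := PySem.Str.lower error
        if PySem.Str.isIn "timeout" el || PySem.Str.isIn "timed out" el then
          cats.modify "timeout" 0 (· + 1)
        else if PySem.Str.isIn "connection" el || PySem.Str.isIn "connect" el then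
          cats.modify "connection_error" 0 (· + 1)
        else if PySem.Str.isIn "auth" el || PySem.Str.isIn "login" el || PySem.Str.isIn "credential" el then
          cats.modify "authentication_error" 0 (· + 1)
        else if PySem.Str.isIn "upload" el then
          cats.modify "upload_error" 0 (· + 1)
        else if PySem.Str.isIn "install" el then
          cats.modify "install_error" 0 (· + 1)
        else if PySem.Str.isIn "reboot" el then
          cats.modify "reboot_error" 0 (· + 1)
        else if PySem.Str.isIn "version" el || PySem.Str.isIn "verify" el then
          cats.modify "verification_error" 0 (· + 1)
        else
          cats.modify "other_error" 0 (· + 1)) PySem.Dict.empty).items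

-- ===== PORT B =====
-- _CATEGORIES: category names indexed by rank
def pvCategories : List String :=
  ["timeout", "connection_error", "authentication_error", "upload_error",
   "install_error", "reboot_error", "verification_error", "other_error"]

-- _KEYWORD_RANK: keyword → rank association (insertion order of the Python dict)
def pvKwRank : List (String × Int) :=
  [("timeout", 0), ("timed out", 0),
   ("connection", 1), ("connect", 1),
   ("auth", 2), ("login", 2), ("credential", 2),
   ("upload", 3), ("install", 4), ("reboot", 5),
   ("version", 6), ("verify", 6)]

-- _classify: min rank over all matching keywords (default 7), then index _CATEGORIES.
-- The final indexing is Python's _CATEGORIES[rank]; rank is always 0..7, so pyGet? is some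
-- (the none arm is unreachable — Python would raise IndexError there).
def pvClassify (error : String) : String :=
  let el := PySem.Str.lower error
  let rank := PySem.List.minD ((pvKwRank.filter (fun p => PySem.Str.isIn p.1 el)).map (·.2)) (fun r => r) 7
  match PySem.List.pyGet? pvCategories rank with
  | some c => c
  | none => ""

def aggregate_error_types_py_alt (devices : List (String × List (String × String))) : List (String × Int) :=
  -- labels = [_classify(d["error"]) for d in devices.values() if d.get("error")]
  let labels := devices.foldl (fun (acc : List String) dev =>
    match (PySem.Dict.mk dev.2).get? "error" with
    | none => acc
    | some e => if e = "" then acc else acc ++ [pvClassify e]) []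
  -- dict(Counter(labels))
  (labels.foldl (fun (c : PySem.Dict String Int) lab => c.modify lab 0 (· + 1)) PySem.Dict.empty).items

-- ===== PRECONDITION & SPEC =====
def Spec_aggregate_error_types_py (devices : List (String × List (String × String))) (out : List (String × Int)) : Prop := out = aggregate_error_types_py_alt devices
instance (devices : List (String × List (String × String))) (out : List (String × Int)) : Decidable (Spec_aggregate_error_types_py devices out) := by unfold Spec_aggregate_error_types_py; infer_instance

-- ===== CLAIM =====
def Claim_equal_aggregate_error_types_py : Prop := ∀ (devices : List (String × List (String × String))), Dom_aggregate_error_types_py devices → Spec_aggregate_error_types_py devices (aggregate_error_types_py devices)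

-- ===== LEMMAS AND PROOFS =====

-- min of a nonempty all-k block followed by elements ≥ k is k (via the library's min? lemmas)
theorem pv_minD_split (m rest : List Int) (k d : Int)
    (hm : ∀ x ∈ m, x = k) (hne : m ≠ []) (hr : ∀ x ∈ rest, k ≤ x) :
    PySem.List.minD (m ++ rest) (fun r => r) d = k := by
  have hnil : m ++ rest ≠ [] := by
    cases m with
    | nil => exact absurd rfl hne
    | cons a t => simp
  obtain ⟨x, hx⟩ : ∃ x, PySem.List.min? (m ++ rest) (fun r => (r : Int)) = some x := by
    rcases h : PySem.List.min? (m ++ rest) (fun r => (r : Int)) with _ | x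
    · exact absurd ((PySem.List.min?_eq_none_iff _ _).mp h) hnil
    · exact ⟨x, rfl⟩
  have hxmem := PySem.List.min?_mem hx
  have hxmin := PySem.List.min?_isMin hx
  have hkmem : k ∈ m ++ rest := by
    cases m with
    | nil => exact absurd rfl hne
    | cons a t => simp [hm a (by simp)]
  have hxk : x ≤ k := hxmin k hkmem
  have hkx : k ≤ x := by
    rcases List.mem_append.mp hxmem with h | h
    · exact le_of_eq (hm x h).symm
    · exact hr x h
  have : x = k := le_antisymm hxk hkx
  unfold PySem.List.minD
  rw [hx, this]
  rfl

-- every second component of a filtered sublist satisfies what all pairs of the list satisfy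
theorem pv_bound (P : Int → Prop) (l : List (String × Int)) (q : String × Int → Bool)
    (h : ∀ a ∈ l, P a.2) : ∀ x ∈ (l.filter q).map (·.2), P x := by
  intro x hx
  rcases List.mem_map.mp hx with ⟨a, ha, rfl⟩
  exact h a (List.mem_filter.mp ha).1

theorem pv_minD_cons (k d : Int) (rest : List Int) (hr : ∀ x ∈ rest, k ≤ x) :
    PySem.List.minD (k :: rest) (fun r => r) d = k :=
  pv_minD_split [k] rest k d (by simp) (by simp) hr

-- the min-rank computation agrees with the first-match group scan, for ANY predicate p
theorem pv_rank_eq (p : String → Bool) :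
    PySem.List.minD ((pvKwRank.filter (fun q => p q.1)).map (·.2)) (fun r => r) 7 =
      (if p "timeout" || p "timed out" then 0
       else if p "connection" || p "connect" then 1
       else if p "auth" || p "login" || p "credential" then 2
       else if p "upload" then 3
       else if p "install" then 4
       else if p "reboot" then 5
       else if p "version" || p "verify" then (6 : Int)
       else 7) := by
  split_ifs with h1 h2 h3 h4 h5 h6 h7
  · -- group 0
    by_cases c1 : p "timeout" = true
    · rw [show pvKwRank = [] ++ ([("timeout", 0)] ++ [("timed out", 0), ("connection", 1), ("connect", 1), ("auth", 2), ("login", 2), ("credential", 2), ("upload", 3), ("install", 4), ("reboot", 5), ("version", 6), ("verify", 6)]) from rfl,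
        List.filter_append, List.filter_append, List.map_append, List.map_append]
      rw [show List.filter (fun q => p q.1) (([] : List (String × Int))) = [] from List.filter_nil,
          show List.filter (fun q => p q.1) (([("timeout", 0)] : List (String × Int))) = [("timeout", 0)] from by simp [c1]]
      simp only [List.map_nil, List.map_cons, List.nil_append, List.cons_append]
      exact pv_minD_cons 0 7 _ (pv_bound _ _ _ (by intro a ha; fin_cases ha <;> decide))
    · have c1' : p "timeout" = false := by simpa using c1
      have clast : p "timed out" = true := by simpa [c1'] using h1
      rw [show pvKwRank = [("timeout", 0)] ++ ([("timed out", 0)] ++ [("connection", 1), ("connect", 1), ("auth", 2), ("login", 2), ("credential", 2), ("upload", 3), ("install", 4), ("reboot", 5), ("version", 6), ("verify", 6)]) from rfl,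
        List.filter_append, List.filter_append, List.map_append, List.map_append]
      rw [show List.filter (fun q => p q.1) (([("timeout", 0)] : List (String × Int))) = [] from
            List.filter_eq_nil_iff.mpr (by intro a ha; fin_cases ha; simp [c1']),
          show List.filter (fun q => p q.1) (([("timed out", 0)] : List (String × Int))) = [("timed out", 0)] from by simp [clast]]
      simp only [List.map_nil, List.map_cons, List.nil_append, List.cons_append]
      exact pv_minD_cons 0 7 _ (pv_bound _ _ _ (by intro a ha; fin_cases ha <;> decide))
  · -- group 1
    simp only [Bool.or_eq_true, not_or, Bool.not_eq_true] at h1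
    by_cases c1 : p "connection" = true
    · rw [show pvKwRank = [("timeout", 0), ("timed out", 0)] ++ ([("connection", 1)] ++ [("connect", 1), ("auth", 2), ("login", 2), ("credential", 2), ("upload", 3), ("install", 4), ("reboot", 5), ("version", 6), ("verify", 6)]) from rfl,
        List.filter_append, List.filter_append, List.map_append, List.map_append]
      rw [show List.filter (fun q => p q.1) (([("timeout", 0), ("timed out", 0)] : List (String × Int))) = [] from
            List.filter_eq_nil_iff.mpr (by intro a ha; fin_cases ha <;> simp [h1.1, h1.2]),
          show List.filter (fun q => p q.1) (([("connection", 1)] : List (String × Int))) = [("connection", 1)] from by simp [c1]]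
      simp only [List.map_nil, List.map_cons, List.nil_append, List.cons_append]
      exact pv_minD_cons 1 7 _ (pv_bound _ _ _ (by intro a ha; fin_cases ha <;> decide))
    · have c1' : p "connection" = false := by simpa using c1
      have clast : p "connect" = true := by simpa [c1'] using h2
      rw [show pvKwRank = [("timeout", 0), ("timed out", 0), ("connection", 1)] ++ ([("connect", 1)] ++ [("auth", 2), ("login", 2), ("credential", 2), ("upload", 3), ("install", 4), ("reboot", 5), ("version", 6), ("verify", 6)]) from rfl,
        List.filter_append, List.filter_append, List.map_append, List.map_append]
      rw [show List.filter (fun q => p q.1) (([("timeout", 0), ("timed out", 0), ("connection", 1)] : List (String × Int))) = [] from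
            List.filter_eq_nil_iff.mpr (by intro a ha; fin_cases ha <;> simp [h1.1, h1.2, c1']),
          show List.filter (fun q => p q.1) (([("connect", 1)] : List (String × Int))) = [("connect", 1)] from by simp [clast]]
      simp only [List.map_nil, List.map_cons, List.nil_append, List.cons_append]
      exact pv_minD_cons 1 7 _ (pv_bound _ _ _ (by intro a ha; fin_cases ha <;> decide))
  · -- group 2
    simp only [Bool.or_eq_true, not_or, Bool.not_eq_true] at h1
    simp only [Bool.or_eq_true, not_or, Bool.not_eq_true] at h2
    by_cases c1 : p "auth" = true
    · rw [show pvKwRank = [("timeout", 0), ("timed out", 0), ("connection", 1), ("connect", 1)] ++ ([("auth", 2)] ++ [("login", 2), ("credential", 2), ("upload", 3), ("install", 4), ("reboot", 5), ("version", 6), ("verify", 6)]) from rfl,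
        List.filter_append, List.filter_append, List.map_append, List.map_append]
      rw [show List.filter (fun q => p q.1) (([("timeout", 0), ("timed out", 0), ("connection", 1), ("connect", 1)] : List (String × Int))) = [] from
            List.filter_eq_nil_iff.mpr (by intro a ha; fin_cases ha <;> simp [h1.1, h1.2, h2.1, h2.2]),
          show List.filter (fun q => p q.1) (([("auth", 2)] : List (String × Int))) = [("auth", 2)] from by simp [c1]]
      simp only [List.map_nil, List.map_cons, List.nil_append, List.cons_append]
      exact pv_minD_cons 2 7 _ (pv_bound _ _ _ (by intro a ha; fin_cases ha <;> decide))
    · have c1' : p "auth" = false := by simpa using c1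
      by_cases c2 : p "login" = true
      · rw [show pvKwRank = [("timeout", 0), ("timed out", 0), ("connection", 1), ("connect", 1), ("auth", 2)] ++ ([("login", 2)] ++ [("credential", 2), ("upload", 3), ("install", 4), ("reboot", 5), ("version", 6), ("verify", 6)]) from rfl,
          List.filter_append, List.filter_append, List.map_append, List.map_append]
        rw [show List.filter (fun q => p q.1) (([("timeout", 0), ("timed out", 0), ("connection", 1), ("connect", 1), ("auth", 2)] : List (String × Int))) = [] from
              List.filter_eq_nil_iff.mpr (by intro a ha; fin_cases ha <;> simp [h1.1, h1.2, h2.1, h2.2, c1']),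
            show List.filter (fun q => p q.1) (([("login", 2)] : List (String × Int))) = [("login", 2)] from by simp [c2]]
        simp only [List.map_nil, List.map_cons, List.nil_append, List.cons_append]
        exact pv_minD_cons 2 7 _ (pv_bound _ _ _ (by intro a ha; fin_cases ha <;> decide))
      · have c2' : p "login" = false := by simpa using c2
        have clast : p "credential" = true := by simpa [c1', c2'] using h3
        rw [show pvKwRank = [("timeout", 0), ("timed out", 0), ("connection", 1), ("connect", 1), ("auth", 2), ("login", 2)] ++ ([("credential", 2)] ++ [("upload", 3), ("install", 4), ("reboot", 5), ("version", 6), ("verify", 6)]) from rfl,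
          List.filter_append, List.filter_append, List.map_append, List.map_append]
        rw [show List.filter (fun q => p q.1) (([("timeout", 0), ("timed out", 0), ("connection", 1), ("connect", 1), ("auth", 2), ("login", 2)] : List (String × Int))) = [] from
              List.filter_eq_nil_iff.mpr (by intro a ha; fin_cases ha <;> simp [h1.1, h1.2, h2.1, h2.2, c1', c2']),
            show List.filter (fun q => p q.1) (([("credential", 2)] : List (String × Int))) = [("credential", 2)] from by simp [clast]]
        simp only [List.map_nil, List.map_cons, List.nil_append, List.cons_append]
        exact pv_minD_cons 2 7 _ (pv_bound _ _ _ (by intro a ha; fin_cases ha <;> decide))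
  · -- group 3
    simp only [Bool.or_eq_true, not_or, Bool.not_eq_true] at h1
    simp only [Bool.or_eq_true, not_or, Bool.not_eq_true] at h2
    simp only [Bool.or_eq_true, not_or, Bool.not_eq_true] at h3
    rw [show pvKwRank = [("timeout", 0), ("timed out", 0), ("connection", 1), ("connect", 1), ("auth", 2), ("login", 2), ("credential", 2)] ++ ([("upload", 3)] ++ [("install", 4), ("reboot", 5), ("version", 6), ("verify", 6)]) from rfl,
      List.filter_append, List.filter_append, List.map_append, List.map_append]
    rw [show List.filter (fun q => p q.1) (([("timeout", 0), ("timed out", 0), ("connection", 1), ("connect", 1), ("auth", 2), ("login", 2), ("credential", 2)] : List (String × Int))) = [] from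
          List.filter_eq_nil_iff.mpr (by intro a ha; fin_cases ha <;> simp [h1.1, h1.2, h2.1, h2.2, h3.1.1, h3.1.2, h3.2]),
        show List.filter (fun q => p q.1) (([("upload", 3)] : List (String × Int))) = [("upload", 3)] from by simp [h4]]
    simp only [List.map_nil, List.map_cons, List.nil_append, List.cons_append]
    exact pv_minD_cons 3 7 _ (pv_bound _ _ _ (by intro a ha; fin_cases ha <;> decide))
  · -- group 4
    simp only [Bool.or_eq_true, not_or, Bool.not_eq_true] at h1
    simp only [Bool.or_eq_true, not_or, Bool.not_eq_true] at h2
    simp only [Bool.or_eq_true, not_or, Bool.not_eq_true] at h3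
    simp only [Bool.not_eq_true] at h4
    rw [show pvKwRank = [("timeout", 0), ("timed out", 0), ("connection", 1), ("connect", 1), ("auth", 2), ("login", 2), ("credential", 2), ("upload", 3)] ++ ([("install", 4)] ++ [("reboot", 5), ("version", 6), ("verify", 6)]) from rfl,
      List.filter_append, List.filter_append, List.map_append, List.map_append]
    rw [show List.filter (fun q => p q.1) (([("timeout", 0), ("timed out", 0), ("connection", 1), ("connect", 1), ("auth", 2), ("login", 2), ("credential", 2), ("upload", 3)] : List (String × Int))) = [] from
          List.filter_eq_nil_iff.mpr (by intro a ha; fin_cases ha <;> simp [h1.1, h1.2, h2.1, h2.2, h3.1.1, h3.1.2, h3.2, h4]),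
        show List.filter (fun q => p q.1) (([("install", 4)] : List (String × Int))) = [("install", 4)] from by simp [h5]]
    simp only [List.map_nil, List.map_cons, List.nil_append, List.cons_append]
    exact pv_minD_cons 4 7 _ (pv_bound _ _ _ (by intro a ha; fin_cases ha <;> decide))
  · -- group 5
    simp only [Bool.or_eq_true, not_or, Bool.not_eq_true] at h1
    simp only [Bool.or_eq_true, not_or, Bool.not_eq_true] at h2
    simp only [Bool.or_eq_true, not_or, Bool.not_eq_true] at h3
    simp only [Bool.not_eq_true] at h4
    simp only [Bool.not_eq_true] at h5
    rw [show pvKwRank = [("timeout", 0), ("timed out", 0), ("connection", 1), ("connect", 1), ("auth", 2), ("login", 2), ("credential", 2), ("upload", 3), ("install", 4)] ++ ([("reboot", 5)] ++ [("version", 6), ("verify", 6)]) from rfl,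
      List.filter_append, List.filter_append, List.map_append, List.map_append]
    rw [show List.filter (fun q => p q.1) (([("timeout", 0), ("timed out", 0), ("connection", 1), ("connect", 1), ("auth", 2), ("login", 2), ("credential", 2), ("upload", 3), ("install", 4)] : List (String × Int))) = [] from
          List.filter_eq_nil_iff.mpr (by intro a ha; fin_cases ha <;> simp [h1.1, h1.2, h2.1, h2.2, h3.1.1, h3.1.2, h3.2, h4, h5]),
        show List.filter (fun q => p q.1) (([("reboot", 5)] : List (String × Int))) = [("reboot", 5)] from by simp [h6]]
    simp only [List.map_nil, List.map_cons, List.nil_append, List.cons_append]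
    exact pv_minD_cons 5 7 _ (pv_bound _ _ _ (by intro a ha; fin_cases ha <;> decide))
  · -- group 6
    simp only [Bool.or_eq_true, not_or, Bool.not_eq_true] at h1
    simp only [Bool.or_eq_true, not_or, Bool.not_eq_true] at h2
    simp only [Bool.or_eq_true, not_or, Bool.not_eq_true] at h3
    simp only [Bool.not_eq_true] at h4
    simp only [Bool.not_eq_true] at h5
    simp only [Bool.not_eq_true] at h6
    by_cases c1 : p "version" = true
    · rw [show pvKwRank = [("timeout", 0), ("timed out", 0), ("connection", 1), ("connect", 1), ("auth", 2), ("login", 2), ("credential", 2), ("upload", 3), ("install", 4), ("reboot", 5)] ++ ([("version", 6)] ++ [("verify", 6)]) from rfl,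
        List.filter_append, List.filter_append, List.map_append, List.map_append]
      rw [show List.filter (fun q => p q.1) (([("timeout", 0), ("timed out", 0), ("connection", 1), ("connect", 1), ("auth", 2), ("login", 2), ("credential", 2), ("upload", 3), ("install", 4), ("reboot", 5)] : List (String × Int))) = [] from
            List.filter_eq_nil_iff.mpr (by intro a ha; fin_cases ha <;> simp [h1.1, h1.2, h2.1, h2.2, h3.1.1, h3.1.2, h3.2, h4, h5, h6]),
          show List.filter (fun q => p q.1) (([("version", 6)] : List (String × Int))) = [("version", 6)] from by simp [c1]]
      simp only [List.map_nil, List.map_cons, List.nil_append, List.cons_append]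
      exact pv_minD_cons 6 7 _ (pv_bound _ _ _ (by intro a ha; fin_cases ha; decide))
    · have c1' : p "version" = false := by simpa using c1
      have clast : p "verify" = true := by simpa [c1'] using h7
      rw [show pvKwRank = [("timeout", 0), ("timed out", 0), ("connection", 1), ("connect", 1), ("auth", 2), ("login", 2), ("credential", 2), ("upload", 3), ("install", 4), ("reboot", 5), ("version", 6)] ++ ([("verify", 6)] ++ []) from rfl,
        List.filter_append, List.filter_append, List.map_append, List.map_append]
      rw [show List.filter (fun q => p q.1) (([("timeout", 0), ("timed out", 0), ("connection", 1), ("connect", 1), ("auth", 2), ("login", 2), ("credential", 2), ("upload", 3), ("install", 4), ("reboot", 5), ("version", 6)] : List (String × Int))) = [] from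
            List.filter_eq_nil_iff.mpr (by intro a ha; fin_cases ha <;> simp [h1.1, h1.2, h2.1, h2.2, h3.1.1, h3.1.2, h3.2, h4, h5, h6, c1']),
          show List.filter (fun q => p q.1) (([("verify", 6)] : List (String × Int))) = [("verify", 6)] from by simp [clast]]
      simp only [List.map_nil, List.map_cons, List.nil_append, List.cons_append]
      exact pv_minD_cons 6 7 _ (pv_bound _ _ _ (by intro a ha; fin_cases ha))
  · -- no keyword matches
    simp only [Bool.or_eq_true, not_or, Bool.not_eq_true] at h1
    simp only [Bool.or_eq_true, not_or, Bool.not_eq_true] at h2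
    simp only [Bool.or_eq_true, not_or, Bool.not_eq_true] at h3
    simp only [Bool.not_eq_true] at h4
    simp only [Bool.not_eq_true] at h5
    simp only [Bool.not_eq_true] at h6
    simp only [Bool.or_eq_true, not_or, Bool.not_eq_true] at h7
    rw [show List.filter (fun q => p q.1) pvKwRank = [] from
      List.filter_eq_nil_iff.mpr (by intro a ha; fin_cases ha <;> simp [h1.1, h1.2, h2.1, h2.2, h3.1.1, h3.1.2, h3.2, h4, h5, h6, h7.1, h7.2])]
    rfl

-- per-error: A's if/elif chain picks exactly pvClassify's category
theorem pv_classify_chain (error : String) (cats : PySem.Dict String Int) :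
    (if PySem.Str.isIn "timeout" (PySem.Str.lower error) || PySem.Str.isIn "timed out" (PySem.Str.lower error) then
        cats.modify "timeout" 0 (· + 1)
      else if PySem.Str.isIn "connection" (PySem.Str.lower error) || PySem.Str.isIn "connect" (PySem.Str.lower error) then
        cats.modify "connection_error" 0 (· + 1)
      else if PySem.Str.isIn "auth" (PySem.Str.lower error) || PySem.Str.isIn "login" (PySem.Str.lower error) || PySem.Str.isIn "credential" (PySem.Str.lower error) then
        cats.modify "authentication_error" 0 (· + 1)
      else if PySem.Str.isIn "upload" (PySem.Str.lower error) then
        cats.modify "upload_error" 0 (· + 1)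
      else if PySem.Str.isIn "install" (PySem.Str.lower error) then
        cats.modify "install_error" 0 (· + 1)
      else if PySem.Str.isIn "reboot" (PySem.Str.lower error) then
        cats.modify "reboot_error" 0 (· + 1)
      else if PySem.Str.isIn "version" (PySem.Str.lower error) || PySem.Str.isIn "verify" (PySem.Str.lower error) then
        cats.modify "verification_error" 0 (· + 1)
      else
        cats.modify "other_error" 0 (· + 1))
    = cats.modify (pvClassify error) 0 (· + 1) := by
  have h : pvClassify error =
      (if PySem.Str.isIn "timeout" (PySem.Str.lower error) || PySem.Str.isIn "timed out" (PySem.Str.lower error) then "timeout"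
       else if PySem.Str.isIn "connection" (PySem.Str.lower error) || PySem.Str.isIn "connect" (PySem.Str.lower error) then "connection_error"
       else if PySem.Str.isIn "auth" (PySem.Str.lower error) || PySem.Str.isIn "login" (PySem.Str.lower error) || PySem.Str.isIn "credential" (PySem.Str.lower error) then "authentication_error"
       else if PySem.Str.isIn "upload" (PySem.Str.lower error) then "upload_error"
       else if PySem.Str.isIn "install" (PySem.Str.lower error) then "install_error"
       else if PySem.Str.isIn "reboot" (PySem.Str.lower error) then "reboot_error"
       else if PySem.Str.isIn "version" (PySem.Str.lower error) || PySem.Str.isIn "verify" (PySem.Str.lower error) then "verification_error"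
       else "other_error") := by
    show (let el := PySem.Str.lower error
          let rank := PySem.List.minD ((pvKwRank.filter (fun p => PySem.Str.isIn p.1 el)).map (·.2)) (fun r => r) 7
          match PySem.List.pyGet? pvCategories rank with
          | some c => c
          | none => "") = _
    simp only []
    rw [pv_rank_eq (fun kw => PySem.Str.isIn kw (PySem.Str.lower error))]
    split_ifs <;> rfl
  rw [h]
  split_ifs <;> rfl

-- the per-device optional label list
def pvLabelOf (dev : String × List (String × String)) : List String :=
  match (PySem.Dict.mk dev.2).get? "error" with
  | none => []
  | some e => if e = "" then [] else [pvClassify e]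

-- per device: A's dict update equals counting that device's labels
theorem pv_step (c : PySem.Dict String Int) (dev : String × List (String × String)) :
    (match (PySem.Dict.mk dev.2).get? "error" with
     | none => c
     | some error =>
       if error = "" then c
       else
         if PySem.Str.isIn "timeout" (PySem.Str.lower error) || PySem.Str.isIn "timed out" (PySem.Str.lower error) then
           c.modify "timeout" 0 (· + 1)
         else if PySem.Str.isIn "connection" (PySem.Str.lower error) || PySem.Str.isIn "connect" (PySem.Str.lower error) then
           c.modify "connection_error" 0 (· + 1)
         else if PySem.Str.isIn "auth" (PySem.Str.lower error) || PySem.Str.isIn "login" (PySem.Str.lower error) || PySem.Str.isIn "credential" (PySem.Str.lower error) then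
           c.modify "authentication_error" 0 (· + 1)
         else if PySem.Str.isIn "upload" (PySem.Str.lower error) then
           c.modify "upload_error" 0 (· + 1)
         else if PySem.Str.isIn "install" (PySem.Str.lower error) then
           c.modify "install_error" 0 (· + 1)
         else if PySem.Str.isIn "reboot" (PySem.Str.lower error) then
           c.modify "reboot_error" 0 (· + 1)
         else if PySem.Str.isIn "version" (PySem.Str.lower error) || PySem.Str.isIn "verify" (PySem.Str.lower error) then
           c.modify "verification_error" 0 (· + 1)
         else
           c.modify "other_error" 0 (· + 1))
    = (pvLabelOf dev).foldl (fun (c : PySem.Dict String Int) lab => c.modify lab 0 (· + 1)) c := by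
  unfold pvLabelOf
  cases (PySem.Dict.mk dev.2).get? "error" with
  | none => rfl
  | some e =>
    by_cases he : e = ""
    · simp [he]
    · simp only [he, if_false]
      exact pv_classify_chain e c

-- fold fusion: A's counting fold equals counting the flatMap of labels
theorem pv_fuse (devices : List (String × List (String × String))) (c : PySem.Dict String Int) :
    devices.foldl (fun (cats : PySem.Dict String Int) dev =>
      match (PySem.Dict.mk dev.2).get? "error" with
      | none => cats
      | some error =>
        if error = "" then cats
        else
          let el := PySem.Str.lower error
          if PySem.Str.isIn "timeout" el || PySem.Str.isIn "timed out" el then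
            cats.modify "timeout" 0 (· + 1)
          else if PySem.Str.isIn "connection" el || PySem.Str.isIn "connect" el then
            cats.modify "connection_error" 0 (· + 1)
          else if PySem.Str.isIn "auth" el || PySem.Str.isIn "login" el || PySem.Str.isIn "credential" el then
            cats.modify "authentication_error" 0 (· + 1)
          else if PySem.Str.isIn "upload" el then
            cats.modify "upload_error" 0 (· + 1)
          else if PySem.Str.isIn "install" el then
            cats.modify "install_error" 0 (· + 1)
          else if PySem.Str.isIn "reboot" el then
            cats.modify "reboot_error" 0 (· + 1)
          else if PySem.Str.isIn "version" el || PySem.Str.isIn "verify" el then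
            cats.modify "verification_error" 0 (· + 1)
          else
            cats.modify "other_error" 0 (· + 1)) c
    = (devices.flatMap pvLabelOf).foldl (fun (c : PySem.Dict String Int) lab => c.modify lab 0 (· + 1)) c := by
  induction devices generalizing c with
  | nil => rfl
  | cons dev rest ih =>
    simp only [List.foldl_cons, List.flatMap_cons, List.foldl_append]
    rw [ih]
    congr 1
    exact pv_step c dev

-- B's label collection is the same flatMap
theorem pv_labels (devices : List (String × List (String × String))) :
    devices.foldl (fun (acc : List String) dev =>
      match (PySem.Dict.mk dev.2).get? "error" with
      | none => acc
      | some e => if e = "" then acc else acc ++ [pvClassify e]) []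
    = devices.flatMap pvLabelOf := by
  have h : devices.foldl (fun (acc : List String) dev =>
      match (PySem.Dict.mk dev.2).get? "error" with
      | none => acc
      | some e => if e = "" then acc else acc ++ [pvClassify e]) []
      = devices.foldl (fun acc dev => acc ++ pvLabelOf dev) [] := by
    apply PySem.List.foldl_congr_mem
    intro acc dev _
    show (match (PySem.Dict.mk dev.2).get? "error" with
          | none => acc
          | some e => if e = "" then acc else acc ++ [pvClassify e]) = acc ++ pvLabelOf dev
    unfold pvLabelOf
    cases (PySem.Dict.mk dev.2).get? "error" with
    | none => simp
    | some e =>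
      by_cases he : e = "" <;> simp [he]
  rw [h, PySem.List.foldl_append_eq_flatMap]
  rfl

-- ===== VERDICT =====
theorem aggregate_error_types_py_spec : Claim_equal_aggregate_error_types_py := by
  intro devices _
  unfold Spec_aggregate_error_types_py aggregate_error_types_py aggregate_error_types_py_alt
  congr 1
  rw [pv_fuse, pv_labels]
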